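-- pv_equiv track=rewrite | github.com/unculturedbacterium/GWAS-pipeline-dominance | gwas/bamreader.py | _md_mismatches_fast
-- ===== SOURCE A (Python) =====
-- from typing import List, Tuple, Dict, Optional
--
-- def _md_mismatches_fast(md: str) -> List[Tuple[int, str]]:
--     # Parse MD -> (ref_offset, ref_base) for SNVs; skip deletions as variants
--     out: List[Tuple[int, str]] = []
--     ref_off = 0
--     i = 0
--     n = len(md)
--     while i < n:
--         c = md[i]
--         oc = ord(c)
--         # digits
--         if 48 <= oc <= 57:
--             num = 0
--             while i < n:
--                 oc2 = ord(md[i])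
--                 if 48 <= oc2 <= 57:
--                     num = num * 10 + (oc2 - 48)
--                     i += 1
--                 else:  break
--             ref_off += num
--             continue
--
--         # deletion: ^ACGT...
--         if c == "^":
--             i += 1
--             start = i
--             while i < n:
--                 oc2 = ord(md[i])
--                 if (65 <= oc2 <= 90) or (97 <= oc2 <= 122):
--                     i += 1
--                 else: break
--             ref_off += (i - start)
--             continue
--         # mismatch base
--         if (65 <= oc <= 90) or (97 <= oc <= 122):
--             out.append((ref_off, c))
--             ref_off += 1
--             i += 1
--             continue
--         i += 1
--     return out
-- ===== SOURCE B (Python) =====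
-- from typing import List, Tuple
--
-- def _md_mismatches_fast(md: str) -> List[Tuple[int, str]]:
--     # One-pass state machine over the characters: accumulate the pending digit
--     # run in `num`, track deletion mode with `in_del`; no index arithmetic.
--     out: List[Tuple[int, str]] = []
--     ref_off = 0
--     num = 0
--     in_del = False
--     for c in md:
--         if '0' <= c <= '9':
--             num = num * 10 + (ord(c) - 48)
--             in_del = False
--         elif c == '^':
--             ref_off += num
--             num = 0
--             in_del = True
--         elif 'A' <= c <= 'Z' or 'a' <= c <= 'z':
--             ref_off += num
--             num = 0
--             if in_del:
--                 ref_off += 1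
--             else:
--                 out.append((ref_off, c))
--                 ref_off += 1
--         else:
--             ref_off += num
--             num = 0
--             in_del = False
--     return out
-- ===== Notes on version B (the rewrite author's own statement) =====
-- stated objective: simpler
-- what changed: Replaced A's index-driven outer while loop with nested inner while loops for digit runs and ^-deletions by a single for-each pass over the characters carrying a small state (pending number, deletion flag), with no index arithmetic.
import Mathlib
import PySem

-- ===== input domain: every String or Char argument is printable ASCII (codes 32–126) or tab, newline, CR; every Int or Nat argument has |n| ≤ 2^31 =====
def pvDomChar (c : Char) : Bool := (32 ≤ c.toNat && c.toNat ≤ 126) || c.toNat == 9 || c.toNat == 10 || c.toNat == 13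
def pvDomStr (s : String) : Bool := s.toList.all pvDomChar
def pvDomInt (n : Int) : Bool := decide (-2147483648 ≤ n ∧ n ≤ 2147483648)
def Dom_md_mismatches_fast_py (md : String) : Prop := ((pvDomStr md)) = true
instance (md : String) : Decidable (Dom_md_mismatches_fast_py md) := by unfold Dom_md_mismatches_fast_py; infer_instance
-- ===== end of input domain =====

-- B replaces A's index-driven while loop with nested digit/deletion scans by a single
-- character fold carrying (out, ref_off, pending number, deletion flag); objective: simpler.

-- ===== PORT A =====
-- A's inner digit while-loop: consumes leading digits, Horner-accumulating `num`.
def aDigits : List Char → Int → Int × List Char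
  | [], num => (num, [])
  | c :: cs, num =>
    if 48 ≤ c.toNat ∧ c.toNat ≤ 57 then aDigits cs (num * 10 + ((c.toNat : Int) - 48))
    else (num, c :: cs)

-- A's inner deletion while-loop: consumes leading letters, returning their count (i - start).
def aLetters : List Char → Int → Int × List Char
  | [], k => (k, [])
  | c :: cs, k =>
    if (65 ≤ c.toNat ∧ c.toNat ≤ 90) ∨ (97 ≤ c.toNat ∧ c.toNat ≤ 122) then aLetters cs (k + 1)
    else (k, c :: cs)

theorem aDigits_len (cs : List Char) : ∀ num, (aDigits cs num).2.length ≤ cs.length := by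
  induction cs with
  | nil => intro num; simp [aDigits]
  | cons c cs ih =>
    intro num
    by_cases h : 48 ≤ c.toNat ∧ c.toNat ≤ 57 <;> simp [aDigits, h]
    exact Nat.le_succ_of_le (ih _)

theorem aLetters_len (cs : List Char) : ∀ k, (aLetters cs k).2.length ≤ cs.length := by
  induction cs with
  | nil => intro k; simp [aLetters]
  | cons c cs ih =>
    intro k
    by_cases h : (65 ≤ c.toNat ∧ c.toNat ≤ 90) ∨ (97 ≤ c.toNat ∧ c.toNat ≤ 122) <;>
      simp [aLetters, h]
    exact Nat.le_succ_of_le (ih _)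

-- A's outer while-loop over the remaining characters.
def aGo : List Char → Int → List (Int × String) → List (Int × String)
  | [], _, out => out
  | c :: cs, refOff, out =>
    if hd : 48 ≤ c.toNat ∧ c.toNat ≤ 57 then
      -- digits
      let r := aDigits (c :: cs) 0
      aGo r.2 (refOff + r.1) out
    else if c = '^' then
      -- deletion: ^ACGT...
      let r := aLetters cs 0
      aGo r.2 (refOff + r.1) out
    else if (65 ≤ c.toNat ∧ c.toNat ≤ 90) ∨ (97 ≤ c.toNat ∧ c.toNat ≤ 122) then
      -- mismatch base
      aGo cs (refOff + 1) (out ++ [(refOff, String.ofList [c])])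
    else
      aGo cs refOff out
termination_by cs => cs.length
decreasing_by
  · simp only [aDigits, if_pos hd]
    exact Nat.lt_succ_of_le (aDigits_len cs _)
  · exact Nat.lt_succ_of_le (aLetters_len cs 0)
  · simp
  · simp

def md_mismatches_fast_py (md : String) : List (Int × String) :=
  aGo md.toList 0 []

-- ===== PORT B =====
-- One step of B's for-loop; state = (out, ref_off, num, in_del).
def bStep (st : List (Int × String) × Int × Int × Bool) (c : Char) :
    List (Int × String) × Int × Int × Bool :=
  let (out, refOff, num, inDel) := st
  if '0' ≤ c ∧ c ≤ '9' then
    (out, refOff, num * 10 + ((c.toNat : Int) - 48), false)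
  else if c = '^' then
    (out, refOff + num, 0, true)
  else if ('A' ≤ c ∧ c ≤ 'Z') ∨ ('a' ≤ c ∧ c ≤ 'z') then
    if inDel then (out, refOff + num + 1, 0, true)
    else (out ++ [(refOff + num, String.ofList [c])], refOff + num + 1, 0, false)
  else
    (out, refOff + num, 0, false)

def md_mismatches_fast_py_alt (md : String) : List (Int × String) :=
  (md.toList.foldl bStep ([], 0, 0, false)).1

-- ===== PRECONDITION & SPEC =====
def Spec_md_mismatches_fast_py (md : String) (out : List (Int × String)) : Prop := out = md_mismatches_fast_py_alt md
instance (md : String) (out : List (Int × String)) : Decidable (Spec_md_mismatches_fast_py md out) := by unfold Spec_md_mismatches_fast_py; infer_instance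

-- ===== CLAIM (what is proved, stated in full; the proofs are below) =====
def Claim_equal_md_mismatches_fast_py : Prop := ∀ (md : String), Dom_md_mismatches_fast_py md → Spec_md_mismatches_fast_py md (md_mismatches_fast_py md)

-- ===== LEMMAS AND PROOFS =====

-- run B's fold and project the output list
def bRun (cs : List Char) (st : List (Int × String) × Int × Int × Bool) : List (Int × String) :=
  (cs.foldl bStep st).1

-- B's char-class tests (on Char order) agree with A's ord-range tests (definitionally)
theorem dig_bridge (c : Char) : ('0' ≤ c ∧ c ≤ '9') ↔ (48 ≤ c.toNat ∧ c.toNat ≤ 57) := by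
  constructor <;> intro h <;> exact ⟨h.1, h.2⟩

theorem al_bridge (c : Char) :
    (('A' ≤ c ∧ c ≤ 'Z') ∨ ('a' ≤ c ∧ c ≤ 'z')) ↔
    ((65 ≤ c.toNat ∧ c.toNat ≤ 90) ∨ (97 ≤ c.toNat ∧ c.toNat ≤ 122)) := by
  constructor <;> (intro h; rcases h with h | h)
  · exact Or.inl ⟨h.1, h.2⟩
  · exact Or.inr ⟨h.1, h.2⟩
  · exact Or.inl ⟨h.1, h.2⟩
  · exact Or.inr ⟨h.1, h.2⟩

-- a letter is neither a digit nor '^'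
theorem letter_not_digit {c : Char}
    (h : (65 ≤ c.toNat ∧ c.toNat ≤ 90) ∨ (97 ≤ c.toNat ∧ c.toNat ≤ 122)) :
    ¬(48 ≤ c.toNat ∧ c.toNat ≤ 57) := by omega

theorem letter_not_caret {c : Char}
    (h : (65 ≤ c.toNat ∧ c.toNat ≤ 90) ∨ (97 ≤ c.toNat ∧ c.toNat ≤ 122)) : ¬(c = '^') := by
  intro hc; subst hc; revert h; decide

-- running B's fold inside a digit run tracks A's inner digit loop
theorem L_digits (cs : List Char) : ∀ num out refOff,
    List.foldl bStep (out, refOff, num, false) cs =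
    List.foldl bStep (out, refOff, (aDigits cs num).1, false) (aDigits cs num).2 := by
  induction cs with
  | nil => intro num out refOff; simp [aDigits]
  | cons c cs ih =>
    intro num out refOff
    by_cases h : 48 ≤ c.toNat ∧ c.toNat ≤ 57
    · simp only [aDigits, if_pos h, List.foldl_cons, bStep]
      rw [if_pos ((dig_bridge c).mpr h)]
      exact ih _ _ _
    · simp [aDigits, h]

-- A's inner digit loop stops at a non-digit (or the end)
theorem aDigits_head (cs : List Char) : ∀ num, (aDigits cs num).2 = [] ∨
    ∃ d ds, (aDigits cs num).2 = d :: ds ∧ ¬(48 ≤ d.toNat ∧ d.toNat ≤ 57) := by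
  induction cs with
  | nil => intro num; exact Or.inl rfl
  | cons c cs ih =>
    intro num
    by_cases h : 48 ≤ c.toNat ∧ c.toNat ≤ 57
    · simpa [aDigits, h] using ih _
    · exact Or.inr ⟨c, cs, by simp [aDigits, h], h⟩

-- flushing the pending number before a non-digit changes nothing
theorem L_flush (cs : List Char)
    (h : cs = [] ∨ ∃ d ds, cs = d :: ds ∧ ¬(48 ≤ d.toNat ∧ d.toNat ≤ 57)) :
    ∀ out refOff num, bRun cs (out, refOff, num, false) = bRun cs (out, refOff + num, 0, false) := by
  rcases h with h | ⟨d, ds, h, hd⟩ <;> subst h <;> intro out refOff num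
  · rfl
  · have hd' : ¬('0' ≤ d ∧ d ≤ '9') := fun hc => hd ((dig_bridge d).mp hc)
    simp only [bRun, List.foldl_cons, bStep, if_neg hd']
    split_ifs <;> norm_num

-- accumulator shift for A's deletion-letter counter
theorem aLetters_shift (cs : List Char) : ∀ k,
    aLetters cs k = ((aLetters cs 0).1 + k, (aLetters cs 0).2) := by
  induction cs with
  | nil => intro k; simp [aLetters]
  | cons c cs ih =>
    intro k
    by_cases h : (65 ≤ c.toNat ∧ c.toNat ≤ 90) ∨ (97 ≤ c.toNat ∧ c.toNat ≤ 122)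
    · simp only [aLetters, if_pos h, zero_add]
      rw [ih (k + 1), ih 1, Prod.mk.injEq]
      exact ⟨by omega, rfl⟩
    · simp [aLetters, h]

-- B in deletion mode tracks A's inner deletion loop
theorem L_del (cs : List Char) : ∀ out refOff,
    bRun cs (out, refOff, 0, true) =
    bRun (aLetters cs 0).2 (out, refOff + (aLetters cs 0).1, 0, false) := by
  induction cs with
  | nil => intro out refOff; simp [bRun, aLetters]
  | cons c cs ih =>
    intro out refOff
    by_cases hl : (65 ≤ c.toNat ∧ c.toNat ≤ 90) ∨ (97 ≤ c.toNat ∧ c.toNat ≤ 122)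
    · have h1 : ¬('0' ≤ c ∧ c ≤ '9') := fun hc => letter_not_digit hl ((dig_bridge c).mp hc)
      have h2 : ¬(c = '^') := letter_not_caret hl
      have hstep : bRun (c :: cs) (out, refOff, 0, true) = bRun cs (out, refOff + 0 + 1, 0, true) := by
        simp only [bRun, List.foldl_cons, bStep, if_neg h1, if_neg h2,
          if_pos ((al_bridge c).mpr hl), if_true]
      rw [hstep, ih out (refOff + 0 + 1)]
      simp only [aLetters, if_pos hl, zero_add]
      rw [aLetters_shift cs 1]
      have he : refOff + 0 + 1 + (aLetters cs 0).1 = refOff + ((aLetters cs 0).1 + 1) := by omega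
      rw [he]
    · -- non-letter head: the deletion flag makes no difference on this step
      have h3 : ¬(('A' ≤ c ∧ c ≤ 'Z') ∨ ('a' ≤ c ∧ c ≤ 'z')) := fun h => hl ((al_bridge c).mp h)
      simp only [aLetters, if_neg hl]
      simp only [bRun, List.foldl_cons, bStep, if_neg h3]
      split_ifs <;> norm_num

-- A's outer loop equals B's fold started in normal mode
theorem main_lemma : ∀ n (cs : List Char), cs.length ≤ n → ∀ refOff out,
    aGo cs refOff out = bRun cs (out, refOff, 0, false) := by
  intro n
  induction n with
  | zero =>
    intro cs h refOff out
    rw [List.length_eq_zero_iff.mp (Nat.le_zero.mp h)]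
    simp [aGo, bRun]
  | succ n ih =>
    intro cs hlen refOff out
    match cs with
    | [] => simp [aGo, bRun]
    | c :: cs =>
      have hcs : cs.length ≤ n := by simpa using hlen
      by_cases hd : 48 ≤ c.toNat ∧ c.toNat ≤ 57
      · -- digit run
        rw [aGo, dif_pos hd]
        simp only [aDigits, if_pos hd]
        have hr : (aDigits cs (0 * 10 + ((c.toNat : Int) - 48))).2.length ≤ n :=
          le_trans (aDigits_len cs _) hcs
        rw [ih _ hr]
        simp only [bRun, List.foldl_cons, bStep]
        rw [if_pos ((dig_bridge c).mpr hd)]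
        rw [show (List.foldl bStep (out, refOff, 0 * 10 + ((c.toNat : Int) - 48), false) cs) =
            List.foldl bStep (out, refOff,
              (aDigits cs (0 * 10 + ((c.toNat : Int) - 48))).1, false)
              (aDigits cs (0 * 10 + ((c.toNat : Int) - 48))).2 from L_digits cs _ _ _]
        exact (L_flush _ (aDigits_head cs _) out refOff _).symm
      · rw [aGo, dif_neg hd]
        by_cases hc : c = '^'
        · -- deletion
          rw [if_pos hc]
          have hr : (aLetters cs 0).2.length ≤ n := le_trans (aLetters_len cs 0) hcs
          rw [ih _ hr]
          have hstep : bRun (c :: cs) (out, refOff, 0, false) = bRun cs (out, refOff + 0, 0, true) := by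
            simp only [bRun, List.foldl_cons, bStep]
            rw [if_neg (fun h => hd ((dig_bridge c).mp h)), if_pos hc]
          rw [hstep, L_del cs out (refOff + 0)]
          norm_num
        · rw [if_neg hc]
          by_cases hl : (65 ≤ c.toNat ∧ c.toNat ≤ 90) ∨ (97 ≤ c.toNat ∧ c.toNat ≤ 122)
          · -- mismatch base
            rw [if_pos hl, ih _ hcs]
            simp only [bRun, List.foldl_cons, bStep]
            rw [if_neg (fun h => hd ((dig_bridge c).mp h)), if_neg hc,
              if_pos ((al_bridge c).mpr hl)]
            simp [add_zero]
          · -- other character: skipped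
            rw [if_neg hl, ih _ hcs]
            simp only [bRun, List.foldl_cons, bStep]
            rw [if_neg (fun h => hd ((dig_bridge c).mp h)), if_neg hc,
              if_neg (fun h => hl ((al_bridge c).mp h))]
            simp [add_zero]

-- ===== VERDICT (by name: the statement is the Claim_ definition above) =====
theorem md_mismatches_fast_py_spec : Claim_equal_md_mismatches_fast_py := by
  intro md _
  unfold Spec_md_mismatches_fast_py md_mismatches_fast_py md_mismatches_fast_py_alt
  exact main_lemma md.toList.length md.toList le_rfl 0 []
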